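-- pv_equiv track=rewrite | github.com/aafontoura/budget-notion | src/application/services/auto_tagger.py | _infer_frequency_tag
-- ===== SOURCE A (Python) =====
-- def _infer_frequency_tag(category: str, subcategory: str | None) -> str | None:
--     """
--     Infer frequency tag from category/subcategory name.
--
--     Args:
--         category: Main category.
--         subcategory: Sub-category.
--
--     Returns:
--         Frequency tag or None.
--     """
--     if not subcategory:
--         return None
--
--     subcategory_lower = subcategory.lower()
--
--     # Check for frequency indicators in name
--     if "monthly" in subcategory_lower or "month" in subcategory_lower:
--         return "monthly"
--     elif "yearly" in subcategory_lower or "year" in subcategory_lower or "annual" in subcategory_lower: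
--         return "yearly"
--     elif "quarterly" in subcategory_lower or "quarter" in subcategory_lower:
--         return "quarterly"
--     elif "weekly" in subcategory_lower or "week" in subcategory_lower:
--         return "weekly"
--
--     # Infer from specific subcategories
--     recurring_subcategories = {
--         "monthly": [
--             "mortgage", "insurance", "subscription", "rent", "salary",
--             "utilities", "internet", "mobile", "gym", "membership"
--         ],
--         "yearly": [
--             "tax", "annual", "vakantiegeld", "bonus", "holiday allowance"
--         ],
--     }
--
--     for freq, keywords in recurring_subcategories.items():
--         if any(keyword in subcategory_lower for keyword in keywords):
--             return freq
--
--     return None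
-- ===== SOURCE B (Python) =====
-- # Different algorithm: instead of testing each keyword for membership, build a
-- # keyword -> (priority, tag) hash map once and probe it with every substring
-- # window of the lowered name, keeping the lowest-priority hit.
-- _GROUPS = [
--     ("monthly", ["monthly", "month"]),
--     ("yearly", ["yearly", "year", "annual"]),
--     ("quarterly", ["quarterly", "quarter"]),
--     ("weekly", ["weekly", "week"]),
--     ("monthly", ["mortgage", "insurance", "subscription", "rent", "salary",
--                  "utilities", "internet", "mobile", "gym", "membership"]),
--     ("yearly", ["tax", "annual", "vakantiegeld", "bonus", "holiday allowance"]),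
-- ]
--
-- _KW = {}
-- for _prio, (_tag, _kws) in enumerate(_GROUPS):
--     for _kw in _kws:
--         _KW.setdefault(_kw, (_prio, _tag))
--
-- _MAXLEN = max(map(len, _KW))
--
--
-- def _infer_frequency_tag(category, subcategory):
--     if not subcategory:
--         return None
--     sl = subcategory.lower()
--     n = len(sl)
--     best = None
--     for i in range(n):
--         for j in range(i + 1, min(n, i + _MAXLEN) + 1):
--             hit = _KW.get(sl[i:j])
--             if hit is not None and (best is None or hit[0] < best[0]):
--                 best = hit
--     return best[1] if best is not None else None
-- ===== Notes on version B (the rewrite author's own statement) =====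
-- stated objective: alternative
-- what changed: Instead of testing each keyword for substring membership group by group, B builds a keyword->(priority,tag) hash map once and probes it with every substring window of the lowered subcategory, keeping the lowest-priority hit.
import Mathlib
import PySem

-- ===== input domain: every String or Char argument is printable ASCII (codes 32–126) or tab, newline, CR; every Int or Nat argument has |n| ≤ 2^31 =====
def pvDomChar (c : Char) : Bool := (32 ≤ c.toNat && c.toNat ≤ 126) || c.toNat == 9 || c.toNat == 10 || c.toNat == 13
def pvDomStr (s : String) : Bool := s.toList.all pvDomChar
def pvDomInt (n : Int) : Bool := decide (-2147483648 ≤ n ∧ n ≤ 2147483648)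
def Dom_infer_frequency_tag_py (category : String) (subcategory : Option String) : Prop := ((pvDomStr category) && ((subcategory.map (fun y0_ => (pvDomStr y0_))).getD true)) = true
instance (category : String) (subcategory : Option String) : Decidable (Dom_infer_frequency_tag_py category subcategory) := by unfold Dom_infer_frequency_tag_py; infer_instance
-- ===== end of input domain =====

-- B replaces A's per-keyword membership tests by a keyword→(priority, tag) map
-- probed with every substring window, keeping the lowest-priority hit
-- (objective: alternative; not claimed faster).

-- ===== PORT A =====
-- the 'for freq, keywords in recurring_subcategories.items(): if any(...): return freq' loop
def pvRecurLoop (sl : String) : List (String × List String) → Option String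
  | [] => none
  | (freq, kws) :: rest =>
    if kws.any (fun k => PySem.Str.isIn k sl) then some freq else pvRecurLoop sl rest

def infer_frequency_tag_py (category : String) (subcategory : Option String) : Option String :=
  match subcategory with
  | none => none
  | some sub =>
    if sub = "" then none   -- 'if not subcategory' is also true for the empty string
    else
      let sl := PySem.Str.lower sub
      if PySem.Str.isIn "monthly" sl || PySem.Str.isIn "month" sl then some "monthly"
      else if PySem.Str.isIn "yearly" sl || PySem.Str.isIn "year" sl || PySem.Str.isIn "annual" sl then some "yearly"
      else if PySem.Str.isIn "quarterly" sl || PySem.Str.isIn "quarter" sl then some "quarterly"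
      else if PySem.Str.isIn "weekly" sl || PySem.Str.isIn "week" sl then some "weekly"
      else
        pvRecurLoop sl
          [("monthly", ["mortgage", "insurance", "subscription", "rent", "salary",
                        "utilities", "internet", "mobile", "gym", "membership"]),
           ("yearly", ["tax", "annual", "vakantiegeld", "bonus", "holiday allowance"])]

-- ===== PORT B =====
def pvGroups : List (String × List String) :=
  [("monthly", ["monthly", "month"]),
   ("yearly", ["yearly", "year", "annual"]),
   ("quarterly", ["quarterly", "quarter"]),
   ("weekly", ["weekly", "week"]),
   ("monthly", ["mortgage", "insurance", "subscription", "rent", "salary",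
                "utilities", "internet", "mobile", "gym", "membership"]),
   ("yearly", ["tax", "annual", "vakantiegeld", "bonus", "holiday allowance"])]

-- _KW built with dict.setdefault (= insert only if the key is absent; exact)
def pvKW : PySem.Dict String (Int × String) :=
  (PySem.List.enumerate pvGroups).foldl
    (fun d pr => pr.2.2.foldl
      (fun d kw => if d.contains kw then d else d.insert kw (pr.1, pr.2.1)) d)
    PySem.Dict.empty

-- _MAXLEN = max(map(len, _KW)); _KW is a non-empty constant, so Python's max
-- never raises and the .getD fallback is unreachable
def pvMaxLen : Int :=
  (PySem.List.max? (pvKW.items.map (fun p => PySem.Str.len p.1)) id).getD 0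

-- hit = _KW.get(sl[i:j])
def pvHit (sl : String) (i j : Int) : Option (Int × String) :=
  PySem.Dict.get? pvKW (PySem.Str.slice sl (some i) (some j))

-- 'if hit is not None and (best is None or hit[0] < best[0]): best = hit'
def pvUpd (best hit : Option (Int × String)) : Option (Int × String) :=
  match hit with
  | none => best
  | some h =>
    match best with
    | none => some h
    | some b => if h.1 < b.1 then some h else some b

def infer_frequency_tag_py_alt (category : String) (subcategory : Option String) : Option String :=
  match subcategory with
  | none => none
  | some sub =>
    if sub = "" then none   -- 'if not subcategory'
    else
      let sl := PySem.Str.lower sub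
      let n : Int := PySem.Str.len sl
      let best := (PySem.List.pyRange 0 n 1).foldl
        (fun best i =>
          (PySem.List.pyRange (i + 1) (min n (i + pvMaxLen) + 1) 1).foldl
            (fun b j => pvUpd b (pvHit sl i j)) best)
        none
      best.map Prod.snd

-- ===== PRECONDITION & SPEC =====
def Spec_infer_frequency_tag_py (category : String) (subcategory : Option String) (out : Option String) : Prop := out = infer_frequency_tag_py_alt category subcategory
instance (category : String) (subcategory : Option String) (out : Option String) : Decidable (Spec_infer_frequency_tag_py category subcategory out) := by unfold Spec_infer_frequency_tag_py; infer_instance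

-- ===== CLAIM (what is proved, stated in full; the proofs are below) =====
def Claim_equal_infer_frequency_tag_py : Prop := ∀ (category : String) (subcategory : Option String), Dom_infer_frequency_tag_py category subcategory → Spec_infer_frequency_tag_py category subcategory (infer_frequency_tag_py category subcategory)

-- ===== LEMMAS AND PROOFS =====

-- priority of the current 'best' (None ↦ 6, past every real priority)
def pvPi : Option (Int × String) → Int
  | none => 6
  | some v => v.1

-- every value 'best' can take: None or one of the six dict values
def pvGoodList : List (Option (Int × String)) :=
  [none, some (0, "monthly"), some (1, "yearly"), some (2, "quarterly"),
   some (3, "weekly"), some (4, "monthly"), some (5, "yearly")]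

def pvValOf (k : Int) : Option (Int × String) :=
  if k = 0 then some (0, "monthly") else if k = 1 then some (1, "yearly")
  else if k = 2 then some (2, "quarterly") else if k = 3 then some (3, "weekly")
  else if k = 4 then some (4, "monthly") else if k = 5 then some (5, "yearly")
  else none

-- the window index pairs visited by B's two loops, flattened
def pvPairs (n : Int) : List (Int × Int) :=
  (PySem.List.pyRange 0 n 1).flatMap
    (fun i => (PySem.List.pyRange (i + 1) (min n (i + pvMaxLen) + 1) 1).map (fun j => (i, j)))

-- B's accumulator, as a single fold over the flattened hit list
def pvBest (sl : String) : Option (Int × String) :=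
  ((pvPairs (PySem.Str.len sl)).map (fun p => pvHit sl p.1 p.2)).foldl pvUpd none

def pvKWlist : List (String × (Int × String)) :=
  [("monthly", (0, "monthly")), ("month", (0, "monthly")),
   ("yearly", (1, "yearly")), ("year", (1, "yearly")), ("annual", (1, "yearly")),
   ("quarterly", (2, "quarterly")), ("quarter", (2, "quarterly")),
   ("weekly", (3, "weekly")), ("week", (3, "weekly")),
   ("mortgage", (4, "monthly")), ("insurance", (4, "monthly")),
   ("subscription", (4, "monthly")), ("rent", (4, "monthly")),
   ("salary", (4, "monthly")), ("utilities", (4, "monthly")),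
   ("internet", (4, "monthly")), ("mobile", (4, "monthly")),
   ("gym", (4, "monthly")), ("membership", (4, "monthly")),
   ("tax", (5, "yearly")), ("vakantiegeld", (5, "yearly")),
   ("bonus", (5, "yearly")), ("holiday allowance", (5, "yearly"))]

theorem pvKW_eq : pvKW = PySem.Dict.mk pvKWlist := by
  with_unfolding_all rfl

theorem pvMaxLen_eq : pvMaxLen = 17 := by
  with_unfolding_all rfl

theorem pvGet_mem (w : String) (v : Int × String) (h : PySem.Dict.get? pvKW w = some v) :
    (w, v) ∈ pvKWlist := by
  unfold PySem.Dict.get? at h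
  cases hf : List.find? (fun p => p.1 == w) pvKW.items with
  | none => rw [hf] at h; simp at h
  | some p =>
    rw [hf] at h
    simp only [Option.map_some, Option.some.injEq] at h
    have hm : p ∈ pvKW.items := List.mem_of_find?_eq_some hf
    have hk := List.find?_some hf
    have hp : p = (w, v) := by
      obtain ⟨p1, p2⟩ := p
      simp only [beq_iff_eq] at hk
      simp_all
    rw [hp] at hm
    rw [pvKW_eq] at hm
    exact hm

theorem pvGet_good (w : String) : PySem.Dict.get? pvKW w ∈ pvGoodList := by
  cases hf : PySem.Dict.get? pvKW w with
  | none => simp [pvGoodList]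
  | some v =>
    have hm := pvGet_mem w v hf
    have key : ∀ q ∈ pvKWlist, some q.2 ∈ pvGoodList := by decide
    exact key _ hm

theorem pvUpd_good : ∀ b ∈ pvGoodList, ∀ h ∈ pvGoodList,
    pvUpd b h ∈ pvGoodList ∧ pvPi (pvUpd b h) ≤ pvPi b ∧ pvPi (pvUpd b h) ≤ pvPi h := by
  decide

theorem pvUpd_cases (b h : Option (Int × String)) : pvUpd b h = b ∨ pvUpd b h = h := by
  unfold pvUpd
  rcases h with _ | h
  · exact Or.inl rfl
  · rcases b with _ | b
    · exact Or.inr rfl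
    · dsimp only; split_ifs <;> simp

theorem pvFold_facts (hs : List (Option (Int × String))) :
    ∀ b ∈ pvGoodList, (∀ h ∈ hs, h ∈ pvGoodList) →
    (hs.foldl pvUpd b ∈ pvGoodList ∧ pvPi (hs.foldl pvUpd b) ≤ pvPi b ∧
     (∀ h ∈ hs, pvPi (hs.foldl pvUpd b) ≤ pvPi h) ∧
     (hs.foldl pvUpd b = b ∨ hs.foldl pvUpd b ∈ hs)) := by
  induction hs with
  | nil => intro b hb _; exact ⟨hb, le_refl _, by simp, Or.inl rfl⟩
  | cons h t ih =>
    intro b hb hhs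
    have hh : h ∈ pvGoodList := hhs h (by simp)
    have ht : ∀ x ∈ t, x ∈ pvGoodList := fun x hx => hhs x (by simp [hx])
    obtain ⟨hg1, hg2, hg3⟩ := pvUpd_good b hb h hh
    obtain ⟨r1, r2, r3, r4⟩ := ih (pvUpd b h) hg1 ht
    simp only [List.foldl_cons]
    refine ⟨r1, le_trans r2 hg2, ?_, ?_⟩
    · intro x hx
      rcases List.mem_cons.mp hx with rfl | hx
      · exact le_trans r2 hg3
      · exact r3 x hx
    · rcases r4 with r4 | r4
      · rw [r4]
        rcases pvUpd_cases b h with e | e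
        · exact Or.inl e
        · exact Or.inr (by simp [e])
      · exact Or.inr (by simp [r4])

theorem pvGood_val : ∀ o ∈ pvGoodList, o = pvValOf (pvPi o) ∧ 0 ≤ pvPi o ∧ pvPi o ≤ 6 := by
  decide

theorem pvBest_facts (sl : String) :
    pvBest sl ∈ pvGoodList ∧
    (∀ p ∈ pvPairs (PySem.Str.len sl), pvPi (pvBest sl) ≤ pvPi (pvHit sl p.1 p.2)) ∧
    (pvBest sl = none ∨ ∃ p ∈ pvPairs (PySem.Str.len sl), pvBest sl = pvHit sl p.1 p.2) := by
  have hhs : ∀ h ∈ (pvPairs (PySem.Str.len sl)).map (fun p => pvHit sl p.1 p.2), h ∈ pvGoodList := by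
    intro h hm
    obtain ⟨p, _, rfl⟩ := List.mem_map.mp hm
    exact pvGet_good _
  obtain ⟨f1, _, f3, f4⟩ := pvFold_facts _ none (by simp [pvGoodList]) hhs
  refine ⟨f1, ?_, ?_⟩
  · intro p hp
    exact f3 _ (List.mem_map.mpr ⟨p, hp, rfl⟩)
  · rcases f4 with f4 | f4
    · exact Or.inl f4
    · obtain ⟨p, hp, he⟩ := List.mem_map.mp f4
      exact Or.inr ⟨p, hp, he.symm⟩

-- B's nested loops equal the flattened fold
theorem pvAlt_eq_best (category sub : String) (h : ¬ sub = "") :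
    infer_frequency_tag_py_alt category (some sub) = (pvBest (PySem.Str.lower sub)).map Prod.snd := by
  simp only [infer_frequency_tag_py_alt, if_neg h, pvBest, pvPairs,
    List.flatMap_def, List.map_flatten, List.foldl_flatten, List.foldl_map, List.map_map,
    Function.comp]

-- a matched keyword bounds the final priority
theorem pvPi_le_of_isIn (sl kw : String) (v : Int × String)
    (hne : kw.toList ≠ []) (hlen17 : kw.toList.length ≤ 17)
    (hget : PySem.Dict.get? pvKW kw = some v)
    (hin : PySem.Str.isIn kw sl = true) : pvPi (pvBest sl) ≤ v.1 := by
  rw [PySem.Str.isIn_eq] at hin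
  obtain ⟨jn, hpre⟩ := (PySem.Chars.exists_prefix_drop_iff_isIn kw.toList sl.toList).mpr hin
  have hlen := hpre.length_le
  rw [List.length_drop] at hlen
  have hkpos : 0 < kw.toList.length := List.length_pos_iff.mpr hne
  have hjn : jn + kw.toList.length ≤ sl.toList.length := by
    by_cases hj : jn ≤ sl.toList.length
    · omega
    · exfalso
      have : sl.toList.drop jn = [] := List.drop_eq_nil_of_le (by omega)
      rw [this] at hpre
      exact hne (List.prefix_nil.mp hpre)
  have hslice : PySem.Str.slice sl (some (jn : Int)) (some ((jn : Int) + (kw.toList.length : Int))) = kw := by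
    rw [← String.toList_inj, PySem.Str.toList_slice, PySem.Chars.slice_eq_listSlice,
      PySem.List.slice_natCast_add]
    obtain ⟨t, ht⟩ := hpre
    rw [← ht]
    exact List.take_left
  have hhit : pvHit sl (jn : Int) ((jn : Int) + (kw.toList.length : Int)) = some v := by
    unfold pvHit
    rw [hslice]
    exact hget
  have hmem : ((jn : Int), (jn : Int) + (kw.toList.length : Int)) ∈ pvPairs (PySem.Str.len sl) := by
    rw [PySem.Str.len_eq]
    simp only [pvPairs, List.mem_flatMap, List.mem_map, PySem.List.mem_pyRange_one, pvMaxLen_eq]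
    refine ⟨(jn : Int), ⟨by omega, by omega⟩, ⟨(jn : Int) + (kw.toList.length : Int), ⟨by omega, by omega⟩, rfl⟩⟩
  have := (pvBest_facts sl).2.1 _ hmem
  rw [hhit] at this
  exact this

-- any final hit comes from a keyword that occurs in sl
theorem pvDown (sl : String) (v : Int × String) (h : pvBest sl = some v) :
    ∃ w, PySem.Str.isIn w sl = true ∧ (w, v) ∈ pvKWlist := by
  rcases (pvBest_facts sl).2.2 with hn | ⟨p, hp, he⟩
  · rw [h] at hn; exact absurd hn (by simp)
  · rw [h] at he
    have hget : PySem.Dict.get? pvKW (PySem.Str.slice sl (some p.1) (some p.2)) = some v := he.symm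
    refine ⟨PySem.Str.slice sl (some p.1) (some p.2), ?_, pvGet_mem _ _ hget⟩
    have hpb : 0 ≤ p.1 ∧ 0 ≤ p.2 := by
      rw [PySem.Str.len_eq] at hp
      simp only [pvPairs, List.mem_flatMap, List.mem_map, PySem.List.mem_pyRange_one] at hp
      obtain ⟨i, hi, j, hj, rfl⟩ := hp
      exact ⟨hi.1, by omega⟩
    rw [PySem.Str.isIn_eq, PySem.Chars.isIn_iff_infix, PySem.Str.toList_slice,
      PySem.Chars.slice_eq_listSlice, PySem.List.slice_toNat _ hpb.1 hpb.2]
    exact (List.take_prefix _ _).isInfix.trans (List.drop_suffix _ _).isInfix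

set_option maxRecDepth 8000 in
theorem pvCore (sl : String) :
    (pvBest sl).map Prod.snd =
    (if PySem.Str.isIn "monthly" sl || PySem.Str.isIn "month" sl then some "monthly"
     else if PySem.Str.isIn "yearly" sl || PySem.Str.isIn "year" sl || PySem.Str.isIn "annual" sl then some "yearly"
     else if PySem.Str.isIn "quarterly" sl || PySem.Str.isIn "quarter" sl then some "quarterly"
     else if PySem.Str.isIn "weekly" sl || PySem.Str.isIn "week" sl then some "weekly"
     else
       pvRecurLoop sl
         [("monthly", ["mortgage", "insurance", "subscription", "rent", "salary",
                       "utilities", "internet", "mobile", "gym", "membership"]),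
          ("yearly", ["tax", "annual", "vakantiegeld", "bonus", "holiday allowance"])]) := by
  obtain ⟨hG, -, -⟩ := pvBest_facts sl
  obtain ⟨hval, hlb, hub⟩ := pvGood_val _ hG
  set m := pvPi (pvBest sl) with hm
  have up' : ∀ (kw : String) (v : Int × String), kw.toList ≠ [] → kw.toList.length ≤ 17 →
      PySem.Dict.get? (PySem.Dict.mk pvKWlist) kw = some v →
      PySem.Str.isIn kw sl = true → m ≤ v.1 := by
    rw [← pvKW_eq]; exact pvPi_le_of_isIn sl
  have hdis : m = 6 ∨ ∃ w v, v.1 = m ∧ PySem.Str.isIn w sl = true ∧ (w, v) ∈ pvKWlist := by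
    cases hb : pvBest sl with
    | none => left; rw [hm, hb]; rfl
    | some v =>
      right
      obtain ⟨w, hw1, hw2⟩ := pvDown sl v hb
      exact ⟨w, v, by rw [hm, hb]; rfl, hw1, hw2⟩
  simp only [pvRecurLoop, List.any_cons, List.any_nil, Bool.or_false]
  split_ifs with h0 h1 h2 h3 h4 h5
  · -- monthly / month
    have hm0 : m ≤ 0 := by
      rcases Bool.or_eq_true_iff.mp h0 with h | h
      · exact up' "monthly" (0, "monthly") (by decide) (by decide) (by decide) h
      · exact up' "month" (0, "monthly") (by decide) (by decide) (by decide) h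
    have : m = 0 := le_antisymm hm0 hlb
    rw [hval, this]; rfl
  · -- yearly / year / annual
    simp only [Bool.or_eq_true_iff, not_or, Bool.not_eq_true] at h0
    have hm1 : m ≤ 1 := by
      rcases Bool.or_eq_true_iff.mp h1 with h | h
      · rcases Bool.or_eq_true_iff.mp h with h | h
        · exact up' "yearly" (1, "yearly") (by decide) (by decide) (by decide) h
        · exact up' "year" (1, "yearly") (by decide) (by decide) (by decide) h
      · exact up' "annual" (1, "yearly") (by decide) (by decide) (by decide) h
    have hmk : m = 1 := by
      rcases hdis with h6 | ⟨w, v, hv, hwin, hmem⟩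
      · omega
      · simp only [pvKWlist, List.mem_cons, List.not_mem_nil, or_false, Prod.mk.injEq] at hmem
        rcases hmem with ⟨rfl, rfl⟩|⟨rfl, rfl⟩|⟨rfl, rfl⟩|⟨rfl, rfl⟩|⟨rfl, rfl⟩|⟨rfl, rfl⟩|⟨rfl, rfl⟩|⟨rfl, rfl⟩|⟨rfl, rfl⟩|⟨rfl, rfl⟩|⟨rfl, rfl⟩|⟨rfl, rfl⟩|⟨rfl, rfl⟩|⟨rfl, rfl⟩|⟨rfl, rfl⟩|⟨rfl, rfl⟩|⟨rfl, rfl⟩|⟨rfl, rfl⟩|⟨rfl, rfl⟩|⟨rfl, rfl⟩|⟨rfl, rfl⟩|⟨rfl, rfl⟩|⟨rfl, rfl⟩ <;>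
          dsimp only at hv <;> first | omega | simp only [*, Bool.false_eq_true] at hwin
    rw [hval, hmk]; rfl
  · -- quarterly / quarter
    simp only [Bool.or_eq_true_iff, not_or, Bool.not_eq_true] at h0 h1
    have hm2 : m ≤ 2 := by
      rcases Bool.or_eq_true_iff.mp h2 with h | h
      · exact up' "quarterly" (2, "quarterly") (by decide) (by decide) (by decide) h
      · exact up' "quarter" (2, "quarterly") (by decide) (by decide) (by decide) h
    have hmk : m = 2 := by
      rcases hdis with h6 | ⟨w, v, hv, hwin, hmem⟩
      · omega
      · simp only [pvKWlist, List.mem_cons, List.not_mem_nil, or_false, Prod.mk.injEq] at hmem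
        rcases hmem with ⟨rfl, rfl⟩|⟨rfl, rfl⟩|⟨rfl, rfl⟩|⟨rfl, rfl⟩|⟨rfl, rfl⟩|⟨rfl, rfl⟩|⟨rfl, rfl⟩|⟨rfl, rfl⟩|⟨rfl, rfl⟩|⟨rfl, rfl⟩|⟨rfl, rfl⟩|⟨rfl, rfl⟩|⟨rfl, rfl⟩|⟨rfl, rfl⟩|⟨rfl, rfl⟩|⟨rfl, rfl⟩|⟨rfl, rfl⟩|⟨rfl, rfl⟩|⟨rfl, rfl⟩|⟨rfl, rfl⟩|⟨rfl, rfl⟩|⟨rfl, rfl⟩|⟨rfl, rfl⟩ <;>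
          dsimp only at hv <;> first | omega | simp only [*, Bool.false_eq_true] at hwin
    rw [hval, hmk]; rfl
  · -- weekly / week
    simp only [Bool.or_eq_true_iff, not_or, Bool.not_eq_true] at h0 h1 h2
    have hm3 : m ≤ 3 := by
      rcases Bool.or_eq_true_iff.mp h3 with h | h
      · exact up' "weekly" (3, "weekly") (by decide) (by decide) (by decide) h
      · exact up' "week" (3, "weekly") (by decide) (by decide) (by decide) h
    have hmk : m = 3 := by
      rcases hdis with h6 | ⟨w, v, hv, hwin, hmem⟩
      · omega
      · simp only [pvKWlist, List.mem_cons, List.not_mem_nil, or_false, Prod.mk.injEq] at hmem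
        rcases hmem with ⟨rfl, rfl⟩|⟨rfl, rfl⟩|⟨rfl, rfl⟩|⟨rfl, rfl⟩|⟨rfl, rfl⟩|⟨rfl, rfl⟩|⟨rfl, rfl⟩|⟨rfl, rfl⟩|⟨rfl, rfl⟩|⟨rfl, rfl⟩|⟨rfl, rfl⟩|⟨rfl, rfl⟩|⟨rfl, rfl⟩|⟨rfl, rfl⟩|⟨rfl, rfl⟩|⟨rfl, rfl⟩|⟨rfl, rfl⟩|⟨rfl, rfl⟩|⟨rfl, rfl⟩|⟨rfl, rfl⟩|⟨rfl, rfl⟩|⟨rfl, rfl⟩|⟨rfl, rfl⟩ <;>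
          dsimp only at hv <;> first | omega | simp only [*, Bool.false_eq_true] at hwin
    rw [hval, hmk]; rfl
  · -- first recurring group (priority 4, 'monthly')
    simp only [Bool.or_eq_true_iff, not_or, Bool.not_eq_true] at h0 h1 h2 h3
    have hm4 : m ≤ 4 := by
      rcases Bool.or_eq_true_iff.mp h4 with h | h
      · exact up' "mortgage" (4, "monthly") (by decide) (by decide) (by decide) h
      rcases Bool.or_eq_true_iff.mp h with h | h
      · exact up' "insurance" (4, "monthly") (by decide) (by decide) (by decide) h
      rcases Bool.or_eq_true_iff.mp h with h | h
      · exact up' "subscription" (4, "monthly") (by decide) (by decide) (by decide) h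
      rcases Bool.or_eq_true_iff.mp h with h | h
      · exact up' "rent" (4, "monthly") (by decide) (by decide) (by decide) h
      rcases Bool.or_eq_true_iff.mp h with h | h
      · exact up' "salary" (4, "monthly") (by decide) (by decide) (by decide) h
      rcases Bool.or_eq_true_iff.mp h with h | h
      · exact up' "utilities" (4, "monthly") (by decide) (by decide) (by decide) h
      rcases Bool.or_eq_true_iff.mp h with h | h
      · exact up' "internet" (4, "monthly") (by decide) (by decide) (by decide) h
      rcases Bool.or_eq_true_iff.mp h with h | h
      · exact up' "mobile" (4, "monthly") (by decide) (by decide) (by decide) h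
      rcases Bool.or_eq_true_iff.mp h with h | h
      · exact up' "gym" (4, "monthly") (by decide) (by decide) (by decide) h
      · exact up' "membership" (4, "monthly") (by decide) (by decide) (by decide) h
    have hmk : m = 4 := by
      rcases hdis with h6 | ⟨w, v, hv, hwin, hmem⟩
      · omega
      · simp only [pvKWlist, List.mem_cons, List.not_mem_nil, or_false, Prod.mk.injEq] at hmem
        rcases hmem with ⟨rfl, rfl⟩|⟨rfl, rfl⟩|⟨rfl, rfl⟩|⟨rfl, rfl⟩|⟨rfl, rfl⟩|⟨rfl, rfl⟩|⟨rfl, rfl⟩|⟨rfl, rfl⟩|⟨rfl, rfl⟩|⟨rfl, rfl⟩|⟨rfl, rfl⟩|⟨rfl, rfl⟩|⟨rfl, rfl⟩|⟨rfl, rfl⟩|⟨rfl, rfl⟩|⟨rfl, rfl⟩|⟨rfl, rfl⟩|⟨rfl, rfl⟩|⟨rfl, rfl⟩|⟨rfl, rfl⟩|⟨rfl, rfl⟩|⟨rfl, rfl⟩|⟨rfl, rfl⟩ <;>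
          dsimp only at hv <;> first | omega | simp only [*, Bool.false_eq_true] at hwin
    rw [hval, hmk]; rfl
  · -- second recurring group (priority 5, 'yearly')
    simp only [Bool.or_eq_true_iff, not_or, Bool.not_eq_true] at h0 h1 h2 h3 h4
    have hm5 : m ≤ 5 := by
      rcases Bool.or_eq_true_iff.mp h5 with h | h
      · exact up' "tax" (5, "yearly") (by decide) (by decide) (by decide) h
      rcases Bool.or_eq_true_iff.mp h with h | h
      · rw [h1.2] at h; exact absurd h (by decide)
      rcases Bool.or_eq_true_iff.mp h with h | h
      · exact up' "vakantiegeld" (5, "yearly") (by decide) (by decide) (by decide) h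
      rcases Bool.or_eq_true_iff.mp h with h | h
      · exact up' "bonus" (5, "yearly") (by decide) (by decide) (by decide) h
      · exact up' "holiday allowance" (5, "yearly") (by decide) (by decide) (by decide) h
    have hmk : m = 5 := by
      rcases hdis with h6 | ⟨w, v, hv, hwin, hmem⟩
      · omega
      · simp only [pvKWlist, List.mem_cons, List.not_mem_nil, or_false, Prod.mk.injEq] at hmem
        rcases hmem with ⟨rfl, rfl⟩|⟨rfl, rfl⟩|⟨rfl, rfl⟩|⟨rfl, rfl⟩|⟨rfl, rfl⟩|⟨rfl, rfl⟩|⟨rfl, rfl⟩|⟨rfl, rfl⟩|⟨rfl, rfl⟩|⟨rfl, rfl⟩|⟨rfl, rfl⟩|⟨rfl, rfl⟩|⟨rfl, rfl⟩|⟨rfl, rfl⟩|⟨rfl, rfl⟩|⟨rfl, rfl⟩|⟨rfl, rfl⟩|⟨rfl, rfl⟩|⟨rfl, rfl⟩|⟨rfl, rfl⟩|⟨rfl, rfl⟩|⟨rfl, rfl⟩|⟨rfl, rfl⟩ <;>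
          dsimp only at hv <;> first | omega | simp only [*, Bool.false_eq_true] at hwin
    rw [hval, hmk]; rfl
  · -- nothing matches
    simp only [Bool.or_eq_true_iff, not_or, Bool.not_eq_true] at h0 h1 h2 h3 h4 h5
    have hmk : m = 6 := by
      rcases hdis with h6 | ⟨w, v, hv, hwin, hmem⟩
      · exact h6
      · simp only [pvKWlist, List.mem_cons, List.not_mem_nil, or_false, Prod.mk.injEq] at hmem
        rcases hmem with ⟨rfl, rfl⟩|⟨rfl, rfl⟩|⟨rfl, rfl⟩|⟨rfl, rfl⟩|⟨rfl, rfl⟩|⟨rfl, rfl⟩|⟨rfl, rfl⟩|⟨rfl, rfl⟩|⟨rfl, rfl⟩|⟨rfl, rfl⟩|⟨rfl, rfl⟩|⟨rfl, rfl⟩|⟨rfl, rfl⟩|⟨rfl, rfl⟩|⟨rfl, rfl⟩|⟨rfl, rfl⟩|⟨rfl, rfl⟩|⟨rfl, rfl⟩|⟨rfl, rfl⟩|⟨rfl, rfl⟩|⟨rfl, rfl⟩|⟨rfl, rfl⟩|⟨rfl, rfl⟩ <;>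
          simp only [*, Bool.false_eq_true] at hwin
    rw [hval, hmk]; rfl

-- ===== VERDICT (by name: the statement is the Claim_ definition above) =====
theorem infer_frequency_tag_py_spec : Claim_equal_infer_frequency_tag_py := by
  intro category subcategory _
  unfold Spec_infer_frequency_tag_py
  cases subcategory with
  | none => rfl
  | some sub =>
    by_cases h : sub = ""
    · simp [infer_frequency_tag_py, infer_frequency_tag_py_alt, h]
    · rw [pvAlt_eq_best category sub h]
      simp only [infer_frequency_tag_py, if_neg h]
      exact (pvCore (PySem.Str.lower sub)).symm
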